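-- pv_equiv track=rewrite | github.com/Kigozi-14/kigozi-14.github.io | app.py | image_checking
-- ===== SOURCE A (Python) =====
-- def image_checking(image_name):
--     file_types = {'jpg', 'png', 'PNG', 'JPG'}
--     exte = None
--     for i in range(len(image_name)-1, -1, -1):
--         if image_name[i] == '.':
--             exte = image_name[i+1:]
--             break
--     if exte in file_types:
--         return True
--     else:
--         return False
-- ===== SOURCE B (Python) =====
-- def image_checking(image_name):
--     file_types = {'jpg', 'png', 'PNG', 'JPG'}
--     return any(image_name.endswith('.' + ext) for ext in file_types)
-- ===== Notes on version B (the rewrite author's own statement) =====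
-- stated objective: idiomatic
-- what changed: Replaced the backward index scan for the last dot plus slice-and-set-membership with a direct any() over the four allowed extensions testing each dot-prefixed suffix, which only inspects the last four characters instead of scanning the whole name.
import Mathlib
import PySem

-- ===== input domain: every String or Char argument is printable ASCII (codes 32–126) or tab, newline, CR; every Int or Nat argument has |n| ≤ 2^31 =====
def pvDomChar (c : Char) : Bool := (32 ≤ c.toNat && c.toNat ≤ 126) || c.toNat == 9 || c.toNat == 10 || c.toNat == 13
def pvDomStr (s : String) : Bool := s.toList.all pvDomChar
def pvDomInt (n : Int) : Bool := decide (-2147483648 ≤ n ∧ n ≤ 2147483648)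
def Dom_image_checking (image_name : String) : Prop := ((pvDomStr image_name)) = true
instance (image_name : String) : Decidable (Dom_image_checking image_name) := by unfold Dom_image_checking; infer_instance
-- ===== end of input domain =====

-- B replaces A's backward index scan for the last dot (slice + set membership) with an any() over the allowed extensions testing each '.'+ext suffix (idiomatic).

-- ===== PORT A =====
-- the 'for i in range(len(image_name)-1, -1, -1)' loop with break:
-- first index whose char is '.', then exte = image_name[i+1:]
def pvFindExtLoop (cs : List Char) : List Int → Option (List Char)
  | [] => none
  | i :: rest =>
    if PySem.Chars.pyGet? cs i = some '.' then some (PySem.Chars.slice cs (some (i + 1)) none)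
    else pvFindExtLoop cs rest

def pvFileTypes : List (List Char) := ["jpg".toList, "png".toList, "PNG".toList, "JPG".toList]

def image_checking (image_name : String) : Bool :=
  match pvFindExtLoop image_name.toList
      (PySem.List.pyRange (PySem.Str.len image_name - 1) (-1) (-1)) with
  | some e => if pvFileTypes.contains e then true else false   -- 'if exte in file_types'
  | none => false                                              -- exte = None: None is never in file_types

-- ===== PORT B =====
def image_checking_alt (image_name : String) : Bool :=
  (["jpg", "png", "PNG", "JPG"] : List String).any
    (fun ext => PySem.Str.endswith image_name ("." ++ ext))

-- ===== PRECONDITION & SPEC =====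
def Spec_image_checking (image_name : String) (out : Bool) : Prop := out = image_checking_alt image_name
instance (image_name : String) (out : Bool) : Decidable (Spec_image_checking image_name out) := by unfold Spec_image_checking; infer_instance

-- ===== CLAIM (what is proved, stated in full; the proofs are below) =====
def Claim_equal_image_checking : Prop := ∀ (image_name : String), Dom_image_checking image_name → Spec_image_checking image_name (image_checking image_name)

-- ===== LEMMAS AND PROOFS =====

-- the loop over the indices of a prefix does not see the appended char
lemma pvFindExtLoop_append (xs : List Char) (c : Char) :
    ∀ (k : Nat), k ≤ xs.length →
      pvFindExtLoop (xs ++ [c]) (PySem.List.pyRange ((k : Int) - 1) (-1) (-1)) =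
        (pvFindExtLoop xs (PySem.List.pyRange ((k : Int) - 1) (-1) (-1))).map (· ++ [c]) := by
  intro k
  induction k with
  | zero =>
    intro _
    rw [PySem.List.pyRange_neg_one_eq_nil (by omega)]
    simp [pvFindExtLoop]
  | succ k ih =>
    intro hk
    have hlt : (-1 : Int) < (k + 1 : Nat) - 1 := by push_cast; omega
    rw [PySem.List.pyRange_neg_one_cons hlt]
    have hkn : ((k + 1 : Nat) : Int) - 1 = (k : Int) := by push_cast; omega
    have hget : PySem.Chars.pyGet? (xs ++ [c]) ((k : Int)) = PySem.Chars.pyGet? xs ((k : Int)) := by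
      simp only [PySem.Chars.pyGet?, PySem.List.pyGet?_natCast]
      rw [List.getElem?_append_left (by omega)]
    have hslice : PySem.Chars.slice (xs ++ [c]) (some ((k : Int) + 1)) none =
        PySem.Chars.slice xs (some ((k : Int) + 1)) none ++ [c] := by
      have h1 : (k : Int) + 1 = ((k + 1 : Nat) : Int) := by push_cast; ring
      simp only [PySem.Chars.slice, h1, PySem.List.slice_from_natCast]
      rw [List.drop_append_of_le_length (by omega)]
    simp only [pvFindExtLoop, hkn, hget, hslice]
    split
    · simp
    · exact ih (by omega)

-- characterization of A's loop: the chars after the last dot, if there is a dot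
lemma pvFindExtLoop_char (l : List Char) :
    pvFindExtLoop l (PySem.List.pyRange ((l.length : Int) - 1) (-1) (-1)) =
      if '.' ∈ l then some ((l.reverse.takeWhile (· ≠ '.')).reverse) else none := by
  induction l using List.reverseRecOn with
  | nil =>
    rw [PySem.List.pyRange_neg_one_eq_nil (by simp)]
    simp [pvFindExtLoop]
  | append_singleton xs c ih =>
    have hlen : ((xs ++ [c]).length : Int) - 1 = ((xs.length : Nat) : Int) := by
      simp
    rw [hlen, PySem.List.pyRange_neg_one_cons (by omega)]
    have hget : PySem.Chars.pyGet? (xs ++ [c]) ((xs.length : Nat) : Int) = some c := by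
      simp only [PySem.Chars.pyGet?, PySem.List.pyGet?_natCast]
      simp
    simp only [pvFindExtLoop, hget]
    by_cases hc : c = '.'
    · subst hc
      have : PySem.Chars.slice (xs ++ ['.']) (some ((xs.length : Int) + 1)) none = [] := by
        have h1 : (xs.length : Int) + 1 = ((xs.length + 1 : Nat) : Int) := by push_cast; ring
        simp only [PySem.Chars.slice, h1, PySem.List.slice_from_natCast]
        simp
      rw [this]
      simp
    · rw [if_neg (by simp [hc])]
      rw [pvFindExtLoop_append xs c xs.length le_rfl, ih]
      by_cases hd : '.' ∈ xs
      · rw [if_pos hd, if_pos (by simp [hd])]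
        simp only [Option.map_some, List.reverse_append, List.reverse_singleton,
          List.singleton_append]
        rw [List.takeWhile_cons_of_pos (by simpa using hc)]
        simp
      · rw [if_neg hd, if_neg (by simp [hd]; exact fun h => hc h.symm)]
        simp

lemma takeWhile_append_dot (u v : List Char) (hu : ∀ x ∈ u, x ≠ '.') :
    (u ++ '.' :: v).takeWhile (· ≠ '.') = u := by
  induction u with
  | nil => simp
  | cons a u ih =>
    have ha := hu a (by simp)
    rw [List.cons_append, List.takeWhile_cons_of_pos (by simpa using ha),
      ih (fun x hx => hu x (by simp [hx]))]

-- endswith '.'+e for a dot-free e, via the reversed-takeWhile characterization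
lemma endswith_dot_iff (l e : List Char) (he : '.' ∉ e) :
    PySem.Chars.endswith l ('.' :: e) = true ↔
      ('.' ∈ l ∧ l.reverse.takeWhile (· ≠ '.') = e.reverse) := by
  simp only [PySem.Chars.endswith, List.isSuffixOf_iff_suffix]
  constructor
  · rintro ⟨pre, rfl⟩
    constructor
    · simp
    · rw [List.reverse_append, List.reverse_cons, List.append_assoc,
        List.singleton_append]
      exact takeWhile_append_dot _ _ (fun x hx h => he (h ▸ (List.mem_reverse.mp hx)))
  · rintro ⟨hdot, htw⟩
    have hsplit : l.reverse = e.reverse ++ l.reverse.dropWhile (· ≠ '.') := by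
      conv_lhs => rw [← List.takeWhile_append_dropWhile (p := (· ≠ '.')) (l := l.reverse)]
      rw [htw]
    have hne : l.reverse.dropWhile (· ≠ '.') ≠ [] := by
      intro h
      rw [h, List.append_nil] at hsplit
      have : '.' ∈ l.reverse := by simpa using hdot
      rw [hsplit] at this
      exact he (by simpa using this)
    obtain ⟨d, ds, hds⟩ := List.exists_cons_of_ne_nil hne
    have hd : d = '.' := by
      have h0 := List.head_dropWhile_not (p := (· ≠ '.')) (l := l.reverse) hne
      have h1 : (l.reverse.dropWhile (fun x => decide (x ≠ '.'))).head hne = d := by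
        have h2 := congrArg List.head? hds
        rw [List.head?_eq_some_head hne] at h2
        exact Option.some.inj h2
      rw [h1] at h0
      simpa using h0
    refine ⟨(ds.reverse), ?_⟩
    have : l.reverse = e.reverse ++ '.' :: ds := by rw [hsplit, hds, hd]
    calc ds.reverse ++ ('.' :: e) = (e.reverse ++ '.' :: ds).reverse := by simp
    _ = l.reverse.reverse := by rw [this]
    _ = l := by simp

lemma endswith_dot_eq (l e : List Char) (he : '.' ∉ e) (hd : '.' ∈ l) :
    PySem.Chars.endswith l ('.' :: e) =
      decide (l.reverse.takeWhile (· ≠ '.') = e.reverse) := by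
  by_cases h : l.reverse.takeWhile (· ≠ '.') = e.reverse
  · simp only [h, decide_true]
    exact (endswith_dot_iff l e he).mpr ⟨hd, h⟩
  · simp only [h, decide_false]
    rw [← Bool.not_eq_true]
    intro hc
    exact h ((endswith_dot_iff l e he).mp hc).2

lemma endswith_dot_false (l e : List Char) (he : '.' ∉ e) (hd : '.' ∉ l) :
    PySem.Chars.endswith l ('.' :: e) = false := by
  rw [← Bool.not_eq_true]
  intro hc
  exact hd ((endswith_dot_iff l e he).mp hc).1

lemma main_core (l : List Char) :
    (match pvFindExtLoop l (PySem.List.pyRange ((l.length : Int) - 1) (-1) (-1)) with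
      | some e => if pvFileTypes.contains e then true else false
      | none => false) =
    (["jpg", "png", "PNG", "JPG"] : List String).any
      (fun ext => PySem.Chars.endswith l ('.' :: ext.toList)) := by
  rw [pvFindExtLoop_char]
  by_cases hd : '.' ∈ l
  · rw [if_pos hd]
    simp only [List.any_cons, List.any_nil, Bool.or_false]
    rw [endswith_dot_eq l _ (by decide) hd, endswith_dot_eq l _ (by decide) hd,
      endswith_dot_eq l _ (by decide) hd, endswith_dot_eq l _ (by decide) hd]
    simp only [pvFileTypes, List.contains_cons, List.contains_nil, Bool.or_false]
    rw [Bool.eq_iff_iff]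
    simp only [Bool.or_eq_true, beq_iff_eq, decide_eq_true_eq, List.reverse_eq_iff]
    split <;> simp_all
  · rw [if_neg hd]
    simp only [List.any_cons, List.any_nil, Bool.or_false]
    rw [endswith_dot_false l _ (by decide) hd, endswith_dot_false l _ (by decide) hd,
      endswith_dot_false l _ (by decide) hd, endswith_dot_false l _ (by decide) hd]
    simp

-- ===== VERDICT (by name: the statement is the Claim_ definition above) =====
theorem image_checking_spec : Claim_equal_image_checking := by
  intro s _
  unfold Spec_image_checking image_checking image_checking_alt
  have h1 : PySem.Str.len s = ((s.toList.length : Int)) := by simp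
  rw [h1]
  have h2 : ∀ ext : String, PySem.Str.endswith s ("." ++ ext) =
      PySem.Chars.endswith s.toList ('.' :: ext.toList) := by
    intro ext
    rw [PySem.Str.endswith_eq]
    congr 1
    simp
  simp only [h2]
  exact main_core s.toList
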